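-- pv_equiv track=rewrite | github.com/eliottcassidy2000/math | 04-computation/tang_yau_counterexample.py | build_circulant_digraph
-- ===== SOURCE A (Python) =====
-- def build_circulant_digraph(n, S):
--     """Build adjacency matrix for circulant digraph C_n^S."""
--     A = [[0]*n for _ in range(n)]
--     for i in range(n):
--         for s in S:
--             j = (i + s) % n
--             if j != i:
--                 A[i][j] = 1
--     return A
-- ===== SOURCE B (Python) =====
-- def build_circulant_digraph(n, S):
--     """Build adjacency matrix for circulant digraph C_n^S."""
--     if n <= 0:
--         return []
--     D = {s % n for s in S if s % n != 0}
--     return [[1 if (j - i) % n in D else 0 for j in range(n)] for i in range(n)]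
-- ===== Notes on version B (the rewrite author's own statement) =====
-- stated objective: alternative
-- what changed: Instead of looping over S for each row and writing 1 into target columns, B precomputes the set of nonzero offsets D = {s % n} once and builds each row by scanning columns j and testing (j - i) % n in D.
import Mathlib
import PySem

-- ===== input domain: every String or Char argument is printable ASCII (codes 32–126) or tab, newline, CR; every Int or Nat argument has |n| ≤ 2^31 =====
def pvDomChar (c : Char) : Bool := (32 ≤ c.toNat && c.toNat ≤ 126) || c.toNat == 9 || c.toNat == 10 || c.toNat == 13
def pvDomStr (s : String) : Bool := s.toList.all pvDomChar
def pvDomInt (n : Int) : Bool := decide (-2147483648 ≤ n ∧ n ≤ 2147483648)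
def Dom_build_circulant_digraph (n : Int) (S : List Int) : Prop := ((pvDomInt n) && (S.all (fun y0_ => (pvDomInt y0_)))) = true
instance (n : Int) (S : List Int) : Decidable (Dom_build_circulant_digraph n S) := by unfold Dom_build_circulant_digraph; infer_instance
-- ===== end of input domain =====

-- B precomputes the set of nonzero offsets s % n once and fills each row by a column
-- scan testing (j - i) % n against that set, instead of writing to target columns per s ∈ S.

-- ===== PORT A =====
def build_circulant_digraph (n : Int) (S : List Int) : List (List Int) :=
  let A0 := (PySem.List.pyRange 0 n 1).map (fun _ => List.replicate n.toNat (0 : Int))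
  (PySem.List.pyRange 0 n 1).foldl (fun A i =>
    S.foldl (fun A s =>
      let j := PySem.Int.mod (i + s) n
      if j ≠ i then PySem.List.pySetD A i (PySem.List.pySetD (PySem.List.pyGetD A i []) j 1) else A) A) A0

-- ===== PORT B =====
def build_circulant_digraph_alt (n : Int) (S : List Int) : List (List Int) :=
  if n ≤ 0 then []
  else
    let D : PySem.Set Int :=
      PySem.Set.ofList ((S.map (fun s => PySem.Int.mod s n)).filter (fun m => m != 0))
    (PySem.List.pyRange 0 n 1).map (fun i =>
      (PySem.List.pyRange 0 n 1).map (fun j =>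
        if PySem.Set.contains D (PySem.Int.mod (j - i) n) then (1 : Int) else 0))

-- ===== PRECONDITION & SPEC =====
def Spec_build_circulant_digraph (n : Int) (S : List Int) (out : List (List Int)) : Prop := out = build_circulant_digraph_alt n S
instance (n : Int) (S : List Int) (out : List (List Int)) : Decidable (Spec_build_circulant_digraph n S out) := by unfold Spec_build_circulant_digraph; infer_instance

-- ===== CLAIM (what is proved, stated in full; the proofs are below) =====
def Claim_equal_build_circulant_digraph : Prop := ∀ (n : Int) (S : List Int), Dom_build_circulant_digraph n S → Spec_build_circulant_digraph n S (build_circulant_digraph n S)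

-- ===== LEMMAS AND PROOFS =====

-- row fold helper (proof-only): the row A's inner loop produces for a fixed i
def pvRowF (n i : Int) (T : List Int) (r : List Int) : List Int :=
  T.foldl (fun r s =>
    let j := PySem.Int.mod (i + s) n
    if j ≠ i then PySem.List.pySetD r j 1 else r) r

lemma pvRowF_cons (n i s : Int) (T r : List Int) :
    pvRowF n i (s :: T) r = pvRowF n i T
      (if PySem.Int.mod (i + s) n ≠ i then PySem.List.pySetD r (PySem.Int.mod (i + s) n) 1 else r) := rfl

lemma pv_mod_nonneg (a n : Int) (hn : 0 < n) : 0 ≤ PySem.Int.mod a n := by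
  rw [PySem.Int.mod_eq_emod_of_pos hn]; exact Int.emod_nonneg a (by omega)

lemma pv_mod_lt (a n : Int) (hn : 0 < n) : PySem.Int.mod a n < n := by
  rw [PySem.Int.mod_eq_emod_of_pos hn]; exact Int.emod_lt_of_pos a hn

-- arithmetic core: hitting column k from row i via step s ↔ the offset test B performs
lemma pv_key (n i k s : Int) (hn : 0 < n) (hi : 0 ≤ i) (hi' : i < n)
    (hk : 0 ≤ k) (hk' : k < n) :
    (PySem.Int.mod (i + s) n = k ∧ PySem.Int.mod (i + s) n ≠ i) ↔
    (PySem.Int.mod s n = PySem.Int.mod (k - i) n ∧ PySem.Int.mod s n ≠ 0) := by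
  rw [PySem.Int.mod_eq_emod_of_pos hn, PySem.Int.mod_eq_emod_of_pos hn,
    PySem.Int.mod_eq_emod_of_pos hn]
  have hne : n ≠ 0 := by omega
  have ha0 : 0 ≤ s % n := Int.emod_nonneg s hne
  have ha1 : s % n < n := Int.emod_lt_of_pos s hn
  have h1 : (i + s) % n = (i + s % n) % n := by
    conv_lhs => rw [Int.add_emod]
    rw [Int.emod_eq_of_lt hi hi']
  have h2 : (i + s % n) % n = if i + s % n < n then i + s % n else i + s % n - n := by
    split
    · exact Int.emod_eq_of_lt (by omega) (by assumption)
    · rw [← Int.sub_emod_right (i + s % n) n]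
      exact Int.emod_eq_of_lt (by omega) (by omega)
  have h3 : (k - i) % n = if 0 ≤ k - i then k - i else k - i + n := by
    split
    · exact Int.emod_eq_of_lt (by omega) (by omega)
    · rw [← Int.add_emod_right (k - i) n]
      exact Int.emod_eq_of_lt (by omega) (by omega)
  rw [h1, h2, h3]
  split_ifs <;> omega

-- A's inner loop over S only touches row i
lemma pv_inner (n i : Int) (hi : 0 ≤ i) (T : List Int) :
    ∀ (A : List (List Int)), i.toNat < A.length →
    T.foldl (fun A s =>
        let j := PySem.Int.mod (i + s) n
        if j ≠ i then PySem.List.pySetD A i (PySem.List.pySetD (PySem.List.pyGetD A i []) j 1) else A) A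
      = A.set i.toNat (pvRowF n i T (A.getD i.toNat [])) := by
  induction T with
  | nil =>
    intro A hA
    simp only [List.foldl_nil, pvRowF, List.getD_eq_getElem?_getD, List.getElem?_eq_getElem hA,
      Option.getD_some]
    exact (List.set_getElem_self hA).symm
  | cons s T ih =>
    intro A hA
    rw [pvRowF_cons]
    simp only [List.foldl_cons]
    by_cases hj : PySem.Int.mod (i + s) n = i
    · simp only [if_neg (not_not.mpr hj)]
      exact ih A hA
    · simp only [if_pos hj]
      rw [PySem.List.pySetD_of_nonneg A _ hi,
        ih (A.set i.toNat (PySem.List.pySetD (PySem.List.pyGetD A i []) (PySem.Int.mod (i + s) n) 1))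
          (by simpa using hA)]
      rw [List.set_set]
      congr 2
      simp only [List.getD_eq_getElem?_getD, List.getElem?_set_self, hA]
      rw [PySem.List.pyGetD_of_nonneg A [] hi, List.getD_eq_getElem?_getD,
        List.getElem?_eq_getElem hA, Option.getD_some]

lemma pv_rowF_length (n i : Int) (T : List Int) (r : List Int) :
    (pvRowF n i T r).length = r.length := by
  induction T generalizing r with
  | nil => rfl
  | cons s T ih =>
    rw [pvRowF_cons, ih]
    split
    · exact PySem.List.length_pySetD _ _ _
    · rfl

lemma pv_row_entry (n i : Int) (hn : 0 < n) (T : List Int) :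
    ∀ (r : List Int), r.length = n.toNat → ∀ (k : Nat), k < n.toNat →
    (pvRowF n i T r)[k]? =
      if T.any (fun s => (PySem.Int.mod (i + s) n == (k : Int)) &&
          !(PySem.Int.mod (i + s) n == i)) then some 1 else r[k]? := by
  induction T with
  | nil => intro r hr k hk; simp [pvRowF]
  | cons s T ih =>
    intro r hr k hk
    rw [pvRowF_cons]
    simp only [List.any_cons]
    by_cases hj : PySem.Int.mod (i + s) n = i
    · simp only [if_neg (not_not.mpr hj)]
      rw [ih r hr k hk]
      simp [hj]
    · simp only [if_pos hj]
      have hj0 : 0 ≤ PySem.Int.mod (i + s) n := pv_mod_nonneg _ _ hn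
      have hj1 : PySem.Int.mod (i + s) n < n := pv_mod_lt _ _ hn
      rw [PySem.List.pySetD_of_nonneg r _ hj0]
      rw [ih (r.set (PySem.Int.mod (i + s) n).toNat 1) (by simpa using hr) k hk]
      by_cases hT : T.any (fun s => (PySem.Int.mod (i + s) n == (k : Int)) &&
          !(PySem.Int.mod (i + s) n == i)) = true
      · simp [hT]
      · simp only [hT, Bool.or_false]
        rw [List.getElem?_set]
        by_cases hjk : PySem.Int.mod (i + s) n = (k : Int)
        · have ht : (PySem.Int.mod (i + s) n).toNat = k := by omega
          have hki : ¬((k : Int) = i) := by rw [← hjk]; exact hj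
          simp [hjk, hki, hr, hk]
        · have ht : (PySem.Int.mod (i + s) n).toNat ≠ k := by omega
          simp [ht, hjk]

-- the row A's loop builds equals the row B writes by its column scan
lemma pv_row (n i : Int) (S : List Int) (hn : 0 < n) (hi : 0 ≤ i) (hi' : i < n) :
    pvRowF n i S (List.replicate n.toNat 0) =
    (PySem.List.pyRange 0 n 1).map (fun j =>
      if PySem.Set.contains
          (PySem.Set.ofList ((S.map (fun s => PySem.Int.mod s n)).filter (fun m => m != 0)))
          (PySem.Int.mod (j - i) n) then (1 : Int) else 0) := by
  have hcast : ((n.toNat : Int)) = n := Int.toNat_of_nonneg (by omega)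
  apply List.ext_getElem?
  intro k
  by_cases hk : k < n.toNat
  · rw [pv_row_entry n i hn S (List.replicate n.toNat 0) (by simp) k hk]
    conv_rhs => rw [show PySem.List.pyRange 0 n 1 = PySem.List.pyRange 0 ((n.toNat : Int)) 1 by
      rw [hcast]]
    rw [PySem.List.getElem?_map_pyRange_zero _ n.toNat k hk]
    have hmem : (S.any fun s => (PySem.Int.mod (i + s) n == (k : Int)) &&
        !(PySem.Int.mod (i + s) n == i)) =
        PySem.Set.contains
          (PySem.Set.ofList ((S.map (fun s => PySem.Int.mod s n)).filter (fun m => m != 0)))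
          (PySem.Int.mod ((k : Int) - i) n) := by
      rw [Bool.eq_iff_iff]
      rw [show (PySem.Set.contains (PySem.Set.ofList ((S.map (fun s => PySem.Int.mod s n)).filter (fun m => m != 0))) (PySem.Int.mod ((k : Int) - i) n) = true) ↔ (PySem.Int.mod ((k : Int) - i) n ∈ PySem.Set.ofList ((S.map (fun s => PySem.Int.mod s n)).filter (fun m => m != 0))) from List.contains_iff_mem, PySem.Set.mem_ofList]
      simp only [List.any_eq_true, Bool.and_eq_true, beq_iff_eq, Bool.not_eq_true',
        beq_eq_false_iff_ne, List.mem_filter, List.mem_map, bne_iff_ne]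
      constructor
      · rintro ⟨s, hs, h1, h2⟩
        have h3 := (pv_key n i k s hn hi hi' (by omega) (by omega)).mp ⟨h1, h2⟩
        exact ⟨⟨s, hs, h3.1⟩, h3.1 ▸ h3.2⟩
      · rintro ⟨⟨s, hs, hms⟩, hne0⟩
        refine ⟨s, hs, ?_⟩
        exact (pv_key n i k s hn hi hi' (by omega) (by omega)).mpr ⟨hms, hms ▸ hne0⟩
    rw [hmem]
    split <;> simp [hk]
  · have h1 : (pvRowF n i S (List.replicate n.toNat 0)).length ≤ k := by
      rw [pv_rowF_length]; simp; omega
    have h2 : ((PySem.List.pyRange 0 n 1).map (fun j =>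
        if PySem.Set.contains
            (PySem.Set.ofList ((S.map (fun s => PySem.Int.mod s n)).filter (fun m => m != 0)))
            (PySem.Int.mod (j - i) n) then (1 : Int) else 0)).length ≤ k := by
      rw [List.length_map, PySem.List.length_pyRange_one]; omega
    rw [List.getElem?_eq_none h1, List.getElem?_eq_none h2]

-- peeling A's outer loop: rows already built stay, remaining rows are fresh
lemma pv_outer (n : Int) (S : List Int) (hn : 0 < n) :
    ∀ (m : Nat) (a : Int) (P : List (List Int)), 0 ≤ a → a ≤ n → (n - a).toNat = m →
    P.length = a.toNat →
    (PySem.List.pyRange a n 1).foldl (fun A i =>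
      S.foldl (fun A s =>
        let j := PySem.Int.mod (i + s) n
        if j ≠ i then PySem.List.pySetD A i (PySem.List.pySetD (PySem.List.pyGetD A i []) j 1) else A) A)
      (P ++ List.replicate m (List.replicate n.toNat 0))
    = P ++ (PySem.List.pyRange a n 1).map (fun i => pvRowF n i S (List.replicate n.toNat 0)) := by
  intro m
  induction m with
  | zero =>
    intro a P ha han hm hP
    rw [PySem.List.pyRange_one_eq_nil (by omega : n ≤ a)]
    simp
  | succ m ih =>
    intro a P ha han hm hP
    have hlt : a < n := by omega
    rw [PySem.List.pyRange_one_cons hlt]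
    simp only [List.foldl_cons, List.map_cons]
    rw [pv_inner n a ha S _ (by simp only [List.length_append, List.length_replicate, hP]; omega)]
    have hA : (P ++ List.replicate (m + 1) (List.replicate n.toNat 0)).getD a.toNat [] =
        List.replicate n.toNat 0 := by
      rw [List.getD_eq_getElem?_getD, List.getElem?_append_right (by omega : P.length ≤ a.toNat)]
      simp [hP]
    rw [hA]
    have hset : (P ++ List.replicate (m + 1) (List.replicate n.toNat 0)).set a.toNat
        (pvRowF n a S (List.replicate n.toNat 0))
        = (P ++ [pvRowF n a S (List.replicate n.toNat 0)]) ++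
          List.replicate m (List.replicate n.toNat 0) := by
      rw [List.set_append, if_neg (by omega)]
      rw [List.replicate_succ]
      have h0 : a.toNat - P.length = 0 := by omega
      rw [h0, List.set_cons_zero, List.append_cons]
    rw [hset, ih (a + 1) (P ++ [pvRowF n a S (List.replicate n.toNat 0)]) (by omega) (by omega)
      (by omega) (by simp [hP]; omega)]
    simp [List.append_assoc]

-- ===== VERDICT (by name: the statement is the Claim_ definition above) =====
theorem build_circulant_digraph_spec : Claim_equal_build_circulant_digraph := by
  intro n S _
  unfold Spec_build_circulant_digraph
  simp only [build_circulant_digraph, build_circulant_digraph_alt]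
  by_cases hn : n ≤ 0
  · rw [if_pos hn, PySem.List.pyRange_one_eq_nil hn]
    simp
  · rw [if_neg hn]
    replace hn : 0 < n := by omega
    have hA0 : (PySem.List.pyRange 0 n 1).map (fun _ => List.replicate n.toNat (0 : Int)) =
        ([] : List (List Int)) ++ List.replicate (n - 0).toNat (List.replicate n.toNat 0) := by
      rw [List.map_const', PySem.List.length_pyRange_one, List.nil_append]
    rw [hA0, pv_outer n S hn (n - 0).toNat 0 [] le_rfl (by omega) rfl rfl]
    rw [List.nil_append]
    apply List.map_congr_left
    intro i hi
    rw [PySem.List.mem_pyRange_one] at hi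
    exact pv_row n i S hn hi.1 hi.2
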